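-- pv_equiv track=rewrite | github.com/Livia-Zaharia/HOMEWORK | week-2023-03-27/no_of_letters.py | letter_counting
-- ===== SOURCE A (Python) =====
-- def string_prep(text):
--     text=text.upper()
--     text=text.replace('\n',' ')
--
--     words=[]
--     new_words=[]
--
--     words=text.split()
--     for word in words:
--         if not word[-1].isalpha():
--            new_word=word.rstrip(word[-1])
--         else:
--             new_word=word
--
--         new_words.append(new_word)
--
--
--     return new_words
--
-- def letter_counting(text:str)->dict:
--     words=string_prep(text)
--     letters={}
--     for word in words:
--         for letter in word:
--             letters.setdefault(letter,[])
--             letters[letter].append(word)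
--
--     for item in list(letters.keys()):
--         letters[item]=set(letters[item])
--
--     return letters
-- ===== SOURCE B (Python) =====
-- def string_prep(text):
--     text=text.upper()
--     text=text.replace('\n',' ')
--
--     words=[]
--     new_words=[]
--
--     words=text.split()
--     for word in words:
--         if not word[-1].isalpha():
--            new_word=word.rstrip(word[-1])
--         else:
--             new_word=word
--
--         new_words.append(new_word)
--
--
--     return new_words
--
-- def letter_counting(text:str)->dict:
--     words = string_prep(text)
--     letters = dict.fromkeys(ch for word in words for ch in word)
--     return {ch: {w for w in words if ch in w} for ch in letters}
-- ===== Notes on version B (the rewrite author's own statement) =====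
-- stated objective: simpler
-- what changed: Instead of one forward pass that appends each word to a per-letter list for every letter occurrence and then deduplicates every list, B first collects the distinct letters (ordered dedup over all words) and fills each entry with one per-letter filtered scan over the word list ({ch: {w for w in words if ch in w}}).
import Mathlib
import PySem

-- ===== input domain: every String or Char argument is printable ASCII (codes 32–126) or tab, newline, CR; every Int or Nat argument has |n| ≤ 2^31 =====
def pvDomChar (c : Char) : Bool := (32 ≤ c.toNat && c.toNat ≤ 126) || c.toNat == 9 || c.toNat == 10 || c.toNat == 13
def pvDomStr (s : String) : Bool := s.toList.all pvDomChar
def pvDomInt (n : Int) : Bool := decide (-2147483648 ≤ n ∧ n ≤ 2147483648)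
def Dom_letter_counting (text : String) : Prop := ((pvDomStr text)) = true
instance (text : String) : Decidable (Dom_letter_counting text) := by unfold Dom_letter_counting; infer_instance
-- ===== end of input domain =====

-- B builds a letter index first and fills each entry with one filtered scan over the words,
-- instead of A's single accumulating pass plus a deduplication pass (objective: simpler).

-- ===== PORT A =====

-- exact port of w.rstrip(c) for a single strip character c (drop trailing chars equal to c)
def pvRstripChar (w : List Char) (c : Char) : List Char :=
  (w.reverse.dropWhile (· == c)).reverse

-- shared helper: the two Pythons' identical string_prep (words as char lists)
def string_prep (text : String) : List (List Char) :=
  let t1 := PySem.Chars.upper text.toList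
  let t2 := PySem.Chars.replace t1 ['\n'] [' ']
  let words := PySem.Chars.split₀ t2
  words.foldl (fun acc word =>
    let new_word :=
      match PySem.List.pyGet? word (-1) with
      | none => word      -- unreachable: split() never yields an empty word (Python would raise IndexError)
      | some c => if ¬ PySem.Chars.isalpha c then pvRstripChar word c else word
    acc ++ [new_word]) []

def letter_counting (text : String) : List (String × List String) :=
  let words := string_prep text
  let letters : PySem.Dict Char (List (List Char)) :=
    words.foldl (fun d word =>
      word.foldl (fun d letter =>
        PySem.Dict.insert d letter ((PySem.Dict.getD d letter []) ++ [word])) d)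
      (PySem.Dict.mk [])
  letters.items.map (fun kv =>
    (String.singleton kv.1, (PySem.Set.ofList kv.2).map String.ofList))

-- ===== PORT B =====
def letter_counting_alt (text : String) : List (String × List String) :=
  let words := string_prep text
  let letters := PySem.List.dedup (words.flatMap (fun word => word))
  letters.map (fun ch =>
    (String.singleton ch,
     (PySem.Set.ofList (words.filter (fun w => PySem.Chars.isIn [ch] w))).map String.ofList))

-- ===== PRECONDITION & SPEC =====
def Spec_letter_counting (text : String) (out : List (String × List String)) : Prop := out = letter_counting_alt text
instance (text : String) (out : List (String × List String)) : Decidable (Spec_letter_counting text out) := by unfold Spec_letter_counting; infer_instance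

-- ===== CLAIM (what is proved, stated in full; the proofs are below) =====
def Claim_equal_letter_counting : Prop := ∀ (text : String), Dom_letter_counting text → Spec_letter_counting text (letter_counting text)

-- ===== LEMMAS AND PROOFS =====

-- the per-letter occurrence list A accumulates: one copy of w per occurrence of c in w
def pvKw (w : List Char) (c : Char) : List (List Char) :=
  (w.filter (· == c)).map (fun _ => w)

def pvOcc (ws : List (List Char)) (c : Char) : List (List Char) :=
  ws.flatMap (fun w => pvKw w c)

-- A's inner-loop step and word step
def pvStepC (w : List Char) (d : PySem.Dict Char (List (List Char))) (c : Char) :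
    PySem.Dict Char (List (List Char)) :=
  PySem.Dict.insert d c ((PySem.Dict.getD d c []) ++ [w])

lemma find?_map_diag {β : Type} (l : List Char) (val : Char → β) (c : Char) :
    List.find? (fun p => p.1 == c) (l.map (fun x => (x, val x)))
      = if c ∈ l then some (c, val c) else none := by
  induction l with
  | nil => simp
  | cons a l ih =>
    by_cases h : a = c
    · subst h; simp
    · simp [beq_iff_eq, h, ih, Ne.symm h]

lemma getD_diag {β : Type} (l : List Char) (val : Char → β) (c : Char) (dflt : β) :
    PySem.Dict.getD (PySem.Dict.mk (l.map (fun x => (x, val x)))) c dflt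
      = if c ∈ l then val c else dflt := by
  simp only [PySem.Dict.getD, PySem.Dict.get?, find?_map_diag]
  split <;> rfl

lemma contains_diag {β : Type} (l : List Char) (val : Char → β) (c : Char) :
    PySem.Dict.contains (PySem.Dict.mk (l.map (fun x => (x, val x)))) c = decide (c ∈ l) := by
  induction l with
  | nil => simp [PySem.Dict.contains]
  | cons a l ih =>
    simp only [PySem.Dict.contains, List.map_cons, List.any_cons] at ih ⊢
    by_cases h : a = c
    · subst h; simp
    · simp [beq_iff_eq, h, Ne.symm h, ih]

lemma dedup_append_singleton (L : List Char) (c : Char) :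
    PySem.List.dedup (L ++ [c]) = PySem.Set.add (PySem.List.dedup L) c := by
  simp [PySem.List.dedup, PySem.Set.ofList, List.foldl_append]

lemma mem_dedup' (L : List Char) (c : Char) : c ∈ PySem.List.dedup L ↔ c ∈ L := by
  simp

-- one inner-loop step preserves the dictionary invariant
lemma stepC_inv (w : List Char) (L : List Char) (val : Char → List (List Char))
    (hoff : ∀ x, x ∉ L → val x = [])
    (c : Char) :
    pvStepC w (PySem.Dict.mk ((PySem.List.dedup L).map (fun x => (x, val x)))) c
      = PySem.Dict.mk ((PySem.List.dedup (L ++ [c])).map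
          (fun x => (x, if x = c then val x ++ [w] else val x))) := by
  rw [dedup_append_singleton]
  by_cases hc : c ∈ L
  · have hcd : c ∈ PySem.List.dedup L := (mem_dedup' L c).mpr hc
    have hadd : PySem.Set.add (PySem.List.dedup L) c = PySem.List.dedup L := by
      simp [PySem.Set.add, PySem.Set.contains, hc]
    rw [hadd]
    simp only [pvStepC, PySem.Dict.insert, contains_diag, decide_true, if_true,
      getD_diag, hcd]
    congr 1
    rw [List.map_map]
    apply List.map_congr_left
    intro x _
    by_cases hx : x = c
    · subst hx; simp
    · simp [hx, beq_iff_eq]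
  · have hcd : c ∉ PySem.List.dedup L := fun h => hc ((mem_dedup' L c).mp h)
    have hadd : PySem.Set.add (PySem.List.dedup L) c = PySem.List.dedup L ++ [c] := by
      simp only [PySem.Set.add, PySem.Set.contains]
      rw [if_neg (by simpa [List.contains_iff_mem] using hcd)]
    rw [hadd]
    simp only [pvStepC, PySem.Dict.insert, contains_diag, decide_false,
      Bool.false_eq_true, if_false, getD_diag, hcd, if_false]
    simp only [List.map_append]
    congr 1
    congr 1
    · apply List.map_congr_left
      intro x hx
      have hxc : x ≠ c := fun h => hcd (h ▸ hx)
      simp [hxc]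
    · simp [hoff c hc]

-- folding a word's characters extends the invariant by that word's occurrence counts
lemma word_inv (w p : List Char) :
    ∀ (L : List Char) (val : Char → List (List Char)),
    (∀ x, x ∉ L → val x = []) →
    p.foldl (pvStepC w) (PySem.Dict.mk ((PySem.List.dedup L).map (fun x => (x, val x))))
      = PySem.Dict.mk ((PySem.List.dedup (L ++ p)).map
          (fun x => (x, val x ++ (p.filter (· == x)).map (fun _ => w)))) := by
  induction p with
  | nil => intro L val _; simp
  | cons c rest ih =>
    intro L val hoff
    have h1 := stepC_inv w L val hoff c
    simp only [List.foldl_cons, h1]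
    have hoff' : ∀ x, x ∉ L ++ [c] → (if x = c then val x ++ [w] else val x) = [] := by
      intro x hx
      have hxc : x ≠ c := by simp at hx; tauto
      have hxL : x ∉ L := by simp at hx; tauto
      simp [hxc, hoff x hxL]
    rw [ih (L ++ [c]) _ hoff']
    rw [List.append_assoc]
    congr 1
    apply List.map_congr_left
    intro x _
    by_cases hx : x = c
    · subst hx; simp [List.append_assoc]
    · simp [hx, Ne.symm hx, beq_iff_eq]

-- the outer loop: A's dictionary after processing ws
lemma outer_inv (ws : List (List Char)) :
    ∀ (L : List Char) (val : Char → List (List Char)),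
    (∀ x, x ∉ L → val x = []) →
    ws.foldl (fun d word => word.foldl (pvStepC word) d)
        (PySem.Dict.mk ((PySem.List.dedup L).map (fun x => (x, val x))))
      = PySem.Dict.mk ((PySem.List.dedup (L ++ ws.flatMap (fun w => w))).map
          (fun x => (x, val x ++ pvOcc ws x))) := by
  induction ws with
  | nil => intro L val _; simp [pvOcc]
  | cons w ws ih =>
    intro L val hoff
    simp only [List.foldl_cons]
    rw [word_inv w w L val hoff]
    have hoff' : ∀ x, x ∉ L ++ w →
        (val x ++ (w.filter (· == x)).map (fun _ => w)) = [] := by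
      intro x hx
      have hxL : x ∉ L := by simp at hx; tauto
      have hxw : x ∉ w := by simp at hx; tauto
      have : w.filter (· == x) = [] := by
        apply List.filter_eq_nil_iff.mpr
        intro a ha hax
        exact hxw ((beq_iff_eq.mp hax) ▸ ha)
      simp [hoff x hxL, this]
    rw [ih (L ++ w) _ hoff']
    congr 1
    rw [List.append_assoc, List.flatMap_cons]
    apply List.map_congr_left
    intro x _
    simp [pvOcc, pvKw, List.append_assoc]

lemma pvAddIdem {α : Type} [BEq α] [LawfulBEq α] (s : PySem.Set α) (w : α) :
    PySem.Set.add (PySem.Set.add s w) w = PySem.Set.add s w := by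
  have hw : PySem.Set.contains (PySem.Set.add s w) w = true := by
    by_cases h : w ∈ s
    · simp [PySem.Set.add, PySem.Set.contains, h]
    · simp [PySem.Set.add, PySem.Set.contains, h]
  show (if PySem.Set.contains (PySem.Set.add s w) w = true then PySem.Set.add s w
        else PySem.Set.add s w ++ [w]) = PySem.Set.add s w
  rw [if_pos hw]

lemma foldl_add_replicate {α : Type} [BEq α] [LawfulBEq α] (n : Nat) (s : PySem.Set α) (w : α) :
    (List.replicate (n + 1) w).foldl PySem.Set.add s = PySem.Set.add s w := by
  induction n generalizing s with
  | zero => rfl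
  | succ m ih =>
    rw [List.replicate_succ, List.foldl_cons]
    rw [ih (PySem.Set.add s w)]
    exact pvAddIdem s w

lemma kw_eq_replicate (w : List Char) (c : Char) :
    pvKw w c = List.replicate (w.count c) w := by
  rw [pvKw, List.map_const']
  congr 1
  rw [List.count]
  exact Eq.symm List.countP_eq_length_filter

-- deduplicating A's occurrence list gives B's filtered word list, as ordered sets
lemma occ_foldl (c : Char) (ws : List (List Char)) :
    ∀ (s : PySem.Set (List Char)),
    (pvOcc ws c).foldl PySem.Set.add s
      = (ws.filter (fun w => decide (c ∈ w))).foldl PySem.Set.add s := by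
  induction ws with
  | nil => intro s; simp [pvOcc]
  | cons w ws ih =>
    intro s
    simp only [pvOcc, List.flatMap_cons, List.foldl_append, List.filter_cons]
    by_cases hc : c ∈ w
    · have hn : w.count c ≠ 0 := fun h0 => (List.count_eq_zero.mp h0) hc
      obtain ⟨m, hm⟩ := Nat.exists_eq_succ_of_ne_zero hn
      rw [kw_eq_replicate, hm, foldl_add_replicate]
      simpa [hc, pvOcc] using ih (PySem.Set.add s w)
    · have : w.count c = 0 := by simpa [List.count_eq_zero] using hc
      rw [kw_eq_replicate, this]
      simpa [hc, pvOcc] using ih s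

lemma isIn_single (c : Char) (w : List Char) :
    PySem.Chars.isIn [c] w = decide (c ∈ w) := by
  by_cases h : c ∈ w
  · have : [c] <:+: w := by
      obtain ⟨p, q, rfl⟩ := List.append_of_mem h
      exact ⟨p, q, by simp⟩
    simp [h, (PySem.Chars.isIn_iff_infix [c] w).mpr this]
  · have : ¬ [c] <:+: w := fun hi => h (hi.subset (by simp))
    have h2 : PySem.Chars.isIn [c] w ≠ true := fun he => this ((PySem.Chars.isIn_iff_infix [c] w).mp he)
    simp [h, Bool.eq_false_iff.mpr h2]

lemma ofList_occ (c : Char) (ws : List (List Char)) :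
    PySem.Set.ofList (pvOcc ws c)
      = PySem.Set.ofList (ws.filter (fun w => PySem.Chars.isIn [c] w)) := by
  have : ws.filter (fun w => PySem.Chars.isIn [c] w)
       = ws.filter (fun w => decide (c ∈ w)) := by
    apply List.filter_congr; intro w _; exact isIn_single c w
  rw [this, PySem.Set.ofList, PySem.Set.ofList, occ_foldl]

-- the whole-pipeline equality on the prepared word list
lemma main_eq (ws : List (List Char)) :
    ((ws.foldl (fun d word =>
        word.foldl (fun d letter =>
          PySem.Dict.insert d letter ((PySem.Dict.getD d letter []) ++ [word])) d)
      (PySem.Dict.mk [])).items).map (fun kv =>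
        (String.singleton kv.1, (PySem.Set.ofList kv.2).map String.ofList))
    = (PySem.List.dedup (ws.flatMap (fun word => word))).map (fun ch =>
        (String.singleton ch,
         (PySem.Set.ofList (ws.filter (fun w => PySem.Chars.isIn [ch] w))).map String.ofList)) := by
  have h := outer_inv ws [] (fun _ => []) (fun _ _ => rfl)
  simp only [List.nil_append] at h
  rw [show (fun (d : PySem.Dict Char (List (List Char))) (word : List Char) =>
        word.foldl (fun d letter =>
          PySem.Dict.insert d letter ((PySem.Dict.getD d letter []) ++ [word])) d)
      = (fun d word => word.foldl (pvStepC word) d) from rfl]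
  rw [show (PySem.Dict.mk ([] : List (Char × List (List Char))))
        = PySem.Dict.mk ((PySem.List.dedup ([] : List Char)).map
            (fun x => (x, (fun _ => ([] : List (List Char))) x))) from rfl]
  rw [h]
  simp only [List.map_map]
  apply List.map_congr_left
  intro x _
  simp [ofList_occ]

-- ===== VERDICT (by name: the statement is the Claim_ definition above) =====
theorem letter_counting_spec : Claim_equal_letter_counting := by
  intro text _
  show letter_counting text = letter_counting_alt text
  simp only [letter_counting, letter_counting_alt]
  exact main_eq (string_prep text)
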